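-- pv_equiv track=rewrite | github.com/nghiavt2906/TraBong_RaspberryPi4b | main.py | getFieldnames
-- ===== SOURCE A (Python) =====
-- def getFieldnames(numOfTiltmeters, numOfMirals):
--     fieldnames = ['Id', 'Timestamp']
--
--     for i in range(numOfMirals):
--         fieldnames.append('Miral{}-Voltage'.format(i))
--         fieldnames.append('Miral{}-Linear-Position'.format(i))
--
--     for i in range(numOfTiltmeters):
--         fieldnames.append('Tiltmeter{}-X-Angle'.format(i))
--         fieldnames.append('Tiltmeter{}-Y-Angle'.format(i))
--         fieldnames.append('Tiltmeter{}-Temperature'.format(i))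
--
--     return fieldnames
-- ===== SOURCE B (Python) =====
-- def getFieldnames(numOfTiltmeters, numOfMirals):
--     specs = [('Miral', numOfMirals, ['Voltage', 'Linear-Position']),
--              ('Tiltmeter', numOfTiltmeters, ['X-Angle', 'Y-Angle', 'Temperature'])]
--     return ['Id', 'Timestamp'] + [
--         '{}{}-{}'.format(prefix, i, suffix)
--         for prefix, count, suffixes in specs
--         for i in range(count)
--         for suffix in suffixes
--     ]
-- ===== Notes on version B (the rewrite author's own statement) =====
-- stated objective: alternative
-- what changed: Replaces the two hardcoded append loops with a data-driven pass: a spec table (prefix, count, suffixes) consumed by one generic comprehension building the same strings in the same order.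
import Mathlib
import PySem

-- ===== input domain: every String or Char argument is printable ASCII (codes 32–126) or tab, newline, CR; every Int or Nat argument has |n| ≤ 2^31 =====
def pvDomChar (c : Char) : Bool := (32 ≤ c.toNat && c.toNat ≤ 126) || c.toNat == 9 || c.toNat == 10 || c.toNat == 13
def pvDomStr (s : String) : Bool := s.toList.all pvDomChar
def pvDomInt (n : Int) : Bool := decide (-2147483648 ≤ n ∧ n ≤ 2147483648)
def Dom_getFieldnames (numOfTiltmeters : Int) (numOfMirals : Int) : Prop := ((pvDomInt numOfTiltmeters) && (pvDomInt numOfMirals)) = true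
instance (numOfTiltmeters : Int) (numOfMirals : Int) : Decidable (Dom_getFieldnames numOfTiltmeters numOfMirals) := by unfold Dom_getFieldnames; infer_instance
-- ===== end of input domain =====

-- B replaces A's two hardcoded loops by one generic pass over a (prefix, count, suffixes) spec table; same output, same cost (objective: alternative).


-- ===== PORT A =====
def getFieldnames (numOfTiltmeters : Int) (numOfMirals : Int) : List String :=
  let fieldnames := ["Id", "Timestamp"]
  let fieldnames := (PySem.List.pyRange 0 numOfMirals 1).foldl (fun acc i =>
    (acc ++ ["Miral" ++ PySem.Int.toStr i ++ "-Voltage"])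
         ++ ["Miral" ++ PySem.Int.toStr i ++ "-Linear-Position"]) fieldnames
  let fieldnames := (PySem.List.pyRange 0 numOfTiltmeters 1).foldl (fun acc i =>
    ((acc ++ ["Tiltmeter" ++ PySem.Int.toStr i ++ "-X-Angle"])
          ++ ["Tiltmeter" ++ PySem.Int.toStr i ++ "-Y-Angle"])
          ++ ["Tiltmeter" ++ PySem.Int.toStr i ++ "-Temperature"]) fieldnames
  fieldnames

-- ===== PORT B =====
def getFieldnames_alt (numOfTiltmeters : Int) (numOfMirals : Int) : List String :=
  let specs : List (String × Int × List String) :=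
    [("Miral", numOfMirals, ["Voltage", "Linear-Position"]),
     ("Tiltmeter", numOfTiltmeters, ["X-Angle", "Y-Angle", "Temperature"])]
  ["Id", "Timestamp"] ++
    specs.flatMap (fun s =>
      (PySem.List.pyRange 0 s.2.1 1).flatMap (fun i =>
        s.2.2.map (fun suffix => s.1 ++ PySem.Int.toStr i ++ "-" ++ suffix)))

-- ===== PRECONDITION & SPEC =====
def Spec_getFieldnames (numOfTiltmeters : Int) (numOfMirals : Int) (out : List String) : Prop := out = getFieldnames_alt numOfTiltmeters numOfMirals
instance (numOfTiltmeters : Int) (numOfMirals : Int) (out : List String) : Decidable (Spec_getFieldnames numOfTiltmeters numOfMirals out) := by unfold Spec_getFieldnames; infer_instance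

-- ===== CLAIM (what is proved, stated in full; the proofs are below) =====
def Claim_equal_getFieldnames : Prop := ∀ (numOfTiltmeters : Int) (numOfMirals : Int), Dom_getFieldnames numOfTiltmeters numOfMirals → Spec_getFieldnames numOfTiltmeters numOfMirals (getFieldnames numOfTiltmeters numOfMirals)

-- ===== LEMMAS AND PROOFS =====

-- ===== VERDICT (by name: the statement is the Claim_ definition above) =====
theorem getFieldnames_spec : Claim_equal_getFieldnames := by
  intro t m _
  unfold Spec_getFieldnames getFieldnames getFieldnames_alt
  simp only [PySem.List.foldl_append_eq_flatMap, List.flatMap_cons, List.flatMap_nil,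
    List.map_cons, List.map_nil, List.append_nil, List.append_assoc,
    String.append_assoc]
  rfl
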